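-- pv_equiv track=rewrite | github.com/Joshua992700/ESEC-Portal | binarynum_gen.py | generate_binary_numbers
-- ===== SOURCE A (Python) =====
-- from collections import deque
--
-- def generate_binary_numbers(n):
--     result = []
--     q = deque()
--     q.append("1")
--
--     while n > 0:
--         binary = q.popleft()
--         result.append(binary)
--
--         q.append(binary + "0")
--         q.append(binary + "1")
--
--         n -= 1
--
--     return result
-- ===== SOURCE B (Python) =====
-- def generate_binary_numbers(n):
--     # Counter-based: i-th output is the binary representation of i, built by
--     # repeated div/mod; no queue, no parent-to-children string building.
--     result = []
--     i = 1
--     while n > 0: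
--         b = ""
--         k = i
--         while k > 0:
--             b = ("1" if k % 2 == 1 else "0") + b
--             k //= 2
--         result.append(b)
--         i += 1
--         n -= 1
--     return result
-- ===== Notes on version B (the rewrite author's own statement) =====
-- stated objective: simpler
-- what changed: Replaces the BFS deque that builds each binary string from its parent with a plain counter i whose binary representation is computed directly by div/mod each iteration; the queue and the child-generation pattern disappear.
import Mathlib
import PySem

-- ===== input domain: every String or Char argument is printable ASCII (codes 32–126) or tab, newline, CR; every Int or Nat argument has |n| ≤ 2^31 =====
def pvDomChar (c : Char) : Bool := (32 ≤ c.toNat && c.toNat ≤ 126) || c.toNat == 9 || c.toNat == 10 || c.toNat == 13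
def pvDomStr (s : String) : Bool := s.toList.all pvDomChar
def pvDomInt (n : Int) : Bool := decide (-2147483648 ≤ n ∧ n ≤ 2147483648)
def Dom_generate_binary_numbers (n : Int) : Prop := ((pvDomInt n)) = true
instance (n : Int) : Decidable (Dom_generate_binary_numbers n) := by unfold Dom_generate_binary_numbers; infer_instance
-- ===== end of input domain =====

-- B replaces A's BFS deque (each string built from its parent) by a counter whose
-- binary representation is computed directly by div/mod: simpler, no queue.
-- Strings are carried as List Char and packed with String.ofList where Python appends to result (exact on this domain).

-- ===== PORT A =====
-- while n > 0: binary = q.popleft(); result.append(binary); q.append(binary+"0"); q.append(binary+"1"); n -= 1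
-- The deque is never empty here (two pushes per pop, starts nonempty), so the [] branch is unreachable.
def pvLoopA (n : Int) (q : List (List Char)) (res : List String) : List String :=
  if _h : n > 0 then
    match q with
    | [] => res
    | binary :: q' =>
        pvLoopA (n - 1) (q' ++ [binary ++ ['0'], binary ++ ['1']]) (res ++ [String.ofList binary])
  else res
termination_by n.toNat
decreasing_by omega

def generate_binary_numbers (n : Int) : List String :=
  pvLoopA n [['1']] []

-- ===== PORT B =====
-- inner while k > 0: b = ("1" if k % 2 == 1 else "0") + b; k //= 2
def pvBinLoop (k : Nat) (b : List Char) : List Char :=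
  if k > 0 then pvBinLoop (k / 2) ((if k % 2 = 1 then '1' else '0') :: b) else b

-- outer while n > 0: result.append(b); i += 1; n -= 1
def pvLoopB (n : Int) (i : Nat) (res : List String) : List String :=
  if _h : n > 0 then pvLoopB (n - 1) (i + 1) (res ++ [String.ofList (pvBinLoop i [])]) else res
termination_by n.toNat
decreasing_by omega

def generate_binary_numbers_alt (n : Int) : List String :=
  pvLoopB n 1 []

-- ===== PRECONDITION & SPEC =====
def Spec_generate_binary_numbers (n : Int) (out : List String) : Prop := out = generate_binary_numbers_alt n
instance (n : Int) (out : List String) : Decidable (Spec_generate_binary_numbers n out) := by unfold Spec_generate_binary_numbers; infer_instance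

-- ===== CLAIM (what is proved, stated in full; the proofs are below) =====
def Claim_equal_generate_binary_numbers : Prop := ∀ (n : Int), Dom_generate_binary_numbers n → Spec_generate_binary_numbers n (generate_binary_numbers n)

-- ===== LEMMAS AND PROOFS =====

-- the accumulator of the inner conversion loop is a suffix
lemma pvBinLoop_acc (k : Nat) : ∀ b : List Char, pvBinLoop k b = pvBinLoop k [] ++ b := by
  induction k using Nat.strong_induction_on with
  | _ k ih =>
    intro b
    by_cases hk : k > 0
    · conv_lhs => rw [pvBinLoop]
      conv_rhs => rw [pvBinLoop]
      rw [if_pos hk, if_pos hk,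
        ih (k / 2) (by omega), ih (k / 2) (by omega) [(if k % 2 = 1 then '1' else '0')]]
      simp
    · conv_lhs => rw [pvBinLoop]
      conv_rhs => rw [pvBinLoop]
      rw [if_neg hk, if_neg hk]
      simp

lemma pvBinLoop_double (i : Nat) (hi : 1 ≤ i) :
    pvBinLoop (2 * i) [] = pvBinLoop i [] ++ ['0'] := by
  rw [pvBinLoop, if_pos (by omega)]
  have h2 : 2 * i / 2 = i := by omega
  have h1 : 2 * i % 2 = 0 := by omega
  rw [h2, h1]
  simpa using pvBinLoop_acc i ['0']

lemma pvBinLoop_double_succ (i : Nat) (hi : 1 ≤ i) :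
    pvBinLoop (2 * i + 1) [] = pvBinLoop i [] ++ ['1'] := by
  rw [pvBinLoop, if_pos (by omega)]
  have h2 : (2 * i + 1) / 2 = i := by omega
  have h1 : (2 * i + 1) % 2 = 1 := by omega
  rw [h2, h1]
  simpa using pvBinLoop_acc i ['1']

-- invariant: when the counter is i, A's queue holds the binary strings of i, i+1, …, 2i-1
lemma pvLoop_eq (K : Nat) : ∀ (n : Int), n.toNat = K → ∀ (i : Nat) (res : List String), 1 ≤ i →
    pvLoopA n ((List.range' i i).map (fun j => pvBinLoop j [])) res = pvLoopB n i res := by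
  induction K with
  | zero =>
    intro n hn i res hi
    have hn0 : ¬ n > 0 := by omega
    rw [pvLoopA.eq_def, pvLoopB.eq_def]
    simp [hn0]
  | succ K ih =>
    intro n hn i res hi
    have hpos : n > 0 := by omega
    have hq : (List.range' i i).map (fun j => pvBinLoop j []) =
        pvBinLoop i [] :: (List.range' (i+1) (i-1)).map (fun j => pvBinLoop j []) := by
      have : List.range' i i = i :: List.range' (i+1) (i-1) := by
        obtain ⟨m, rfl⟩ : ∃ m, i = m + 1 := ⟨i - 1, by omega⟩
        rw [List.range'_succ]
        simp
      rw [this, List.map_cons]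
    rw [pvLoopA.eq_def, dif_pos hpos, hq]
    show pvLoopA (n - 1)
        (List.map (fun j => pvBinLoop j []) (List.range' (i + 1) (i - 1)) ++
          [pvBinLoop i [] ++ ['0'], pvBinLoop i [] ++ ['1']])
        (res ++ [String.ofList (pvBinLoop i [])]) = pvLoopB n i res
    have hnext : (List.range' (i+1) (i-1)).map (fun j => pvBinLoop j []) ++
        [pvBinLoop i [] ++ ['0'], pvBinLoop i [] ++ ['1']] =
        (List.range' (i+1) (i+1)).map (fun j => pvBinLoop j []) := by
      have hr : List.range' (i+1) (i+1) = List.range' (i+1) (i-1) ++ List.range' (2*i) 2 := by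
        have h := List.range'_append (s := i+1) (m := i-1) (n := 2) (step := 1)
        rw [show (i-1) + 2 = i + 1 by omega, show (i+1) + 1 * (i-1) = 2*i by omega] at h
        exact h.symm
      rw [hr, List.map_append]
      congr 1
      simp [List.range'_succ, pvBinLoop_double i hi, pvBinLoop_double_succ i hi]
    rw [hnext, ih (n-1) (by omega) (i+1) _ (by omega)]
    conv_rhs => rw [pvLoopB.eq_def]
    rw [dif_pos hpos]

-- ===== VERDICT (by name: the statement is the Claim_ definition above) =====
theorem generate_binary_numbers_spec : Claim_equal_generate_binary_numbers := by
  intro n _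
  unfold Spec_generate_binary_numbers generate_binary_numbers generate_binary_numbers_alt
  have h := pvLoop_eq n.toNat n rfl 1 [] (by omega)
  have hb : pvBinLoop 1 [] = ['1'] := by
    rw [pvBinLoop, if_pos (by omega), pvBinLoop]
    simp
  have h1 : (List.range' 1 1).map (fun j => pvBinLoop j []) = [['1']] := by
    rw [show List.range' 1 1 = [1] from rfl]
    simp [hb]
  rw [h1] at h
  exact h
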